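-- pv_equiv track=rewrite | github.com/kh277/BOJ | 백준/Silver/14646. 욱제는 결정장애야！！/욱제는 결정장애야！！.py | solve
-- ===== SOURCE A (Python) =====
-- def solve(N: int, menu: list) -> int:
--     visited = [False for _ in range(N+1)]
--     result = 0
--     count = 0
--
--     for i in menu:
--         if visited[i] == True:
--             count -= 1
--         else:
--             visited[i] = True
--             count += 1
--             result = max(result, count)
--
--     return result
-- ===== SOURCE B (Python) =====
-- def solve(N: int, menu: list) -> int:
--     # Stage 1: record the 0-based positions of first occurrences (table of size
--     # N+1 keeps Python's indexing semantics for the table lookups).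
--     visited = [False] * (N + 1)
--     firsts = []
--     for idx, i in enumerate(menu):
--         if not visited[i]:
--             visited[i] = True
--             firsts.append(idx)
--     # Stage 2: at the k-th first occurrence (1-based) sitting at position p,
--     # the prefix holds k distinct items among p+1 total, so the balance there
--     # is k - ((p+1) - k) = 2*k - p - 1; the answer is the max of these and 0.
--     return max([0] + [2 * k - p - 1 for k, p in enumerate(firsts, 1)])
-- ===== Notes on version B (the rewrite author's own statement) =====
-- stated objective: alternative
-- what changed: B replaces A's single pass with a running +1/-1 balance by two staged passes: it first materialises the list of first-occurrence positions, then computes the answer as a max over that list of the closed-form balance 2*k - p - 1; A's count variable and its branch on repeats disappear entirely.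
import Mathlib
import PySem

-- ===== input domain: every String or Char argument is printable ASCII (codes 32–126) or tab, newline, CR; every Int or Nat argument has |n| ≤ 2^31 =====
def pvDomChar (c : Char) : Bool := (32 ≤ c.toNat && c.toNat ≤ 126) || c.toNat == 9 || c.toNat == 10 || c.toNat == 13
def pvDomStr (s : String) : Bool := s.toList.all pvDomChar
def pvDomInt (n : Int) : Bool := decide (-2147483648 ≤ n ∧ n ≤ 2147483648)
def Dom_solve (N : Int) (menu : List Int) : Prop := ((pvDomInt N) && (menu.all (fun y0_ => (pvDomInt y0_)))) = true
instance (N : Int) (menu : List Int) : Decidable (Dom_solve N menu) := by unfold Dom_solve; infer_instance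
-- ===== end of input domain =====

-- B replaces A's one-pass +1/-1 running balance by two staged passes: collect the
-- first-occurrence positions, then take the max of the closed-form balances there.

-- ===== PORT A =====
def solveLoopA (menu : List Int) (visited : List Bool) (result count : Int) : Int :=
  match menu with
  | [] => result
  | i :: rest =>
    match PySem.List.pyGet? visited i with
    | none => result   -- IndexError in Python; excluded by Pre_solve
    | some b =>
      if b = true then
        solveLoopA rest visited result (count - 1)
      else
        solveLoopA rest (PySem.List.pySetD visited i true) (max result (count + 1)) (count + 1)

def solve (N : Int) (menu : List Int) : Int :=
  solveLoopA menu (List.replicate (N + 1).toNat false) 0 0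

-- ===== PORT B =====
-- Stage 1 of Source B: positions (0-based) of first occurrences.
def firstsLoop (pairs : List (Int × Int)) (visited : List Bool) (acc : List Int) : List Int :=
  match pairs with
  | [] => acc
  | (idx, i) :: rest =>
    match PySem.List.pyGet? visited i with
    | none => acc   -- IndexError in Python; excluded by Pre_solve
    | some b =>
      if b = false then
        firstsLoop rest (PySem.List.pySetD visited i true) (acc ++ [idx])
      else
        firstsLoop rest visited acc

def solve_alt (N : Int) (menu : List Int) : Int :=
  let firsts := firstsLoop (PySem.List.enumerate menu 0) (List.replicate (N + 1).toNat false) []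
  -- Stage 2 of Source B: max([0] + [2*k - p - 1 for k, p in enumerate(firsts, 1)])
  ((PySem.List.enumerate firsts 1).map (fun kp => 2 * kp.1 - kp.2 - 1)).foldl max 0

-- ===== PRECONDITION & SPEC =====
-- Pre_ excludes exactly the menus containing an index outside the visited list
-- of length max(N+1,0), where Python's visited[i] raises IndexError.
def Pre_solve (N : Int) (menu : List Int) : Prop :=
  ∀ i ∈ menu, PySem.Raise.InRange (N + 1).toNat i
instance (N : Int) (menu : List Int) : Decidable (Pre_solve N menu) := by
  unfold Pre_solve; infer_instance

def pvWitness_solve : Int × List Int := (3, [1, 2, 1, -1, 3])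

def Spec_solve (N : Int) (menu : List Int) (out : Int) : Prop := out = solve_alt N menu
instance (N : Int) (menu : List Int) (out : Int) : Decidable (Spec_solve N menu out) := by
  unfold Spec_solve; infer_instance

-- ===== CLAIM (what is proved, stated in full; the proofs are below) =====
def Claim_equal_solve : Prop := ∀ (N : Int) (menu : List Int), Dom_solve N menu → Pre_solve N menu → Spec_solve N menu (solve N menu)

-- ===== LEMMAS AND PROOFS =====

/-- The accumulator of `firstsLoop` is a prefix carried along unchanged. -/
theorem firstsLoop_acc (pairs : List (Int × Int)) :
    ∀ (visited : List Bool) (acc : List Int),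
      firstsLoop pairs visited acc = acc ++ firstsLoop pairs visited [] := by
  induction pairs with
  | nil => intro visited acc; simp [firstsLoop]
  | cons p rest ih =>
    intro visited acc
    obtain ⟨idx, i⟩ := p
    cases h : PySem.List.pyGet? visited i with
    | none => simp [firstsLoop, h]
    | some b =>
      cases b with
      | false =>
        simp only [firstsLoop, h, if_true]
        rw [ih _ (acc ++ [idx]), ih _ ([] ++ [idx])]
        simp
      | true => simp only [firstsLoop, h, Bool.true_eq_false, if_false]; exact ih _ acc

/-- Loop invariant: with `count = 2*k - pos` (k distinct seen among the first
    `pos` items), A's loop equals B's staged max over the remaining first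
    occurrences, folded from `result`. -/
theorem loop_eq (menu : List Int) :
    ∀ (visited : List Bool) (result count k pos : Int),
      (∀ i ∈ menu, PySem.Raise.InRange visited.length i) →
      count = 2 * k - pos →
      solveLoopA menu visited result count
        = ((PySem.List.enumerate
              (firstsLoop (PySem.List.enumerate menu pos) visited []) (k + 1)).map
            (fun kp => 2 * kp.1 - kp.2 - 1)).foldl max result := by
  induction menu with
  | nil => intros; simp [solveLoopA, PySem.List.enumerate_nil, firstsLoop]
  | cons i rest ih =>
    intro visited result count k pos hin hcount
    have hir : PySem.Raise.InRange visited.length i := hin i (by simp)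
    have hrest : ∀ j ∈ rest, PySem.Raise.InRange visited.length j :=
      fun j hj => hin j (by simp [hj])
    obtain ⟨b, hb⟩ : ∃ b, PySem.List.pyGet? visited i = some b := by
      cases h : PySem.List.pyGet? visited i with
      | none => exact absurd hir (by simpa [PySem.List.pyGet?_eq_none_iff] using h)
      | some b => exact ⟨b, rfl⟩
    rw [PySem.List.enumerate_cons]
    cases b with
    | true =>
      simp only [solveLoopA, firstsLoop, hb, Bool.true_eq_false, if_true, if_false]
      exact ih visited result (count - 1) k (pos + 1) hrest (by omega)
    | false =>
      simp only [solveLoopA, firstsLoop, hb, Bool.false_eq_true, if_true, if_false]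
      rw [firstsLoop_acc, List.nil_append, List.singleton_append, PySem.List.enumerate_cons, List.map_cons,
        List.foldl_cons]
      have hlen : (PySem.List.pySetD visited i true).length = visited.length :=
        PySem.List.length_pySetD ..
      have hval : 2 * (k + 1) - pos - 1 = count + 1 := by omega
      rw [hval]
      exact ih _ (max result (count + 1)) (count + 1) (k + 1) (pos + 1)
        (fun j hj => by rw [hlen]; exact hrest j hj) (by omega)

-- ===== VERDICT (by name: the statement is the Claim_ definition above) =====
theorem solve_spec : Claim_equal_solve := by
  intro N menu _ hpre
  unfold Spec_solve solve solve_alt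
  exact loop_eq menu _ 0 0 0 0 (by simpa using hpre) (by ring)
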